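-- pv_equiv track=rewrite | github.com/AdamGabet/LabTools | research/multimodal_baseline/14_find_viable_raw_cohorts.py | count_fixed_pair
-- ===== SOURCE A (Python) =====
-- def count_fixed_pair(modality_maps, pair):
--     visit_a, visit_b = pair
--     subjects = []
--     universe = set().union(*[set(modality_maps[name].keys()) for name in modality_maps])
--     for reg in universe:
--         if all(visit_a in modality_maps[name].get(reg, set()) and visit_b in modality_maps[name].get(reg, set()) for name in modality_maps):
--             subjects.append(reg)
--     return set(subjects)
-- ===== SOURCE B (Python) =====
-- def count_fixed_pair(modality_maps, pair):
--     visit_a, visit_b = pair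
--     if not modality_maps:
--         return set()
--     per_modality = [
--         {reg for reg, visits in d.items() if visit_a in visits and visit_b in visits}
--         for d in modality_maps.values()
--     ]
--     result = per_modality[0]
--     for s in per_modality[1:]:
--         result &= s
--     return result
-- ===== Notes on version B (the rewrite author's own statement) =====
-- stated objective: simpler
-- what changed: Instead of unioning all region keys into a universe and re-testing every region against every modality with repeated dict lookups, B builds one set of qualifying regions per modality in a single pass over its items and intersects these sets.
import Mathlib
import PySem

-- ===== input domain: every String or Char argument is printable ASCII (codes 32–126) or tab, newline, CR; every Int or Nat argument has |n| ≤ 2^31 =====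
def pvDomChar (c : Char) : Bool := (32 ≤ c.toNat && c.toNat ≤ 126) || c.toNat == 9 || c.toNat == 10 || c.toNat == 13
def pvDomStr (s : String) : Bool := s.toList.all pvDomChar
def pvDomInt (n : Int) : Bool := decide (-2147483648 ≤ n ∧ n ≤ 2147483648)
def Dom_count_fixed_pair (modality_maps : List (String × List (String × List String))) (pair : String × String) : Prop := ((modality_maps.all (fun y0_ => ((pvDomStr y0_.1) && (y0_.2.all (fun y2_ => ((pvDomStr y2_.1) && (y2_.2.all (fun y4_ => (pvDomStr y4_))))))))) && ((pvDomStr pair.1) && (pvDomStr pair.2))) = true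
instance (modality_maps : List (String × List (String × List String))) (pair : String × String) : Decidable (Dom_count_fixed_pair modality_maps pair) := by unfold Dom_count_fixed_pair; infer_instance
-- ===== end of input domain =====

-- B replaces A's union-universe-then-retest double loop by building one set of qualifying regions
-- per modality and intersecting them (objective: simpler).


-- ===== PORT A =====
-- 'modality_maps[name].get(reg, set())': first-match association-list lookup with default set() = [] (exact for a Python dict)
def pvGet (d : List (String × List String)) (k : String) : List String :=
  match d with
  | [] => []
  | (k', v) :: rest => if k' == k then v else pvGet rest k

def count_fixed_pair (modality_maps : List (String × List (String × List String))) (pair : String × String) : List String :=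
  let visit_a := pair.1
  let visit_b := pair.2
  -- universe = set().union(*[set(modality_maps[name].keys()) for name in modality_maps])
  let univ : PySem.Set String :=
    modality_maps.foldl
      (fun acc p => PySem.Set.update acc (PySem.List.dedup (p.2.map Prod.fst)))
      PySem.Set.empty
  -- for reg in universe: if all(...): subjects.append(reg)
  let subjects : List String :=
    univ.foldl
      (fun acc reg =>
        if modality_maps.all (fun p =>
             (pvGet p.2 reg).contains visit_a && (pvGet p.2 reg).contains visit_b)
        then acc ++ [reg] else acc) []
  PySem.Set.ofList subjects

-- ===== PORT B =====
-- {reg for reg, visits in d.items() if visit_a in visits and visit_b in visits}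
def goodRegions (d : List (String × List String)) (va vb : String) : PySem.Set String :=
  PySem.Set.ofList ((d.filter (fun q => q.2.contains va && q.2.contains vb)).map Prod.fst)

def count_fixed_pair_alt (modality_maps : List (String × List (String × List String))) (pair : String × String) : List String :=
  let per_modality := modality_maps.map (fun p => goodRegions p.2 pair.1 pair.2)
  match per_modality with
  | [] => []
  | s0 :: rest => rest.foldl (fun acc s => PySem.Set.inter acc s) s0

-- ===== PRECONDITION & SPEC =====
-- Pre_ excludes association lists in which some inner modality map repeats a region key: a Python dict cannot
-- contain duplicate keys, so such inputs are artefacts of the assoc-list encoding and correspond to no Python input.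
def Pre_count_fixed_pair (modality_maps : List (String × List (String × List String))) (pair : String × String) : Prop :=
  ∀ p ∈ modality_maps, (p.2.map Prod.fst).Nodup
instance (modality_maps : List (String × List (String × List String))) (pair : String × String) : Decidable (Pre_count_fixed_pair modality_maps pair) := by unfold Pre_count_fixed_pair; infer_instance

def pvWitness_count_fixed_pair : (List (String × List (String × List String))) × (String × String) :=
  ([("mri", [("r1", ["a", "b"]), ("r2", ["a"])]), ("pet", [("r1", ["b", "a"])])], ("a", "b"))

def Spec_count_fixed_pair (modality_maps : List (String × List (String × List String))) (pair : String × String) (out : List String) : Prop := out = count_fixed_pair_alt modality_maps pair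
instance (modality_maps : List (String × List (String × List String))) (pair : String × String) (out : List String) : Decidable (Spec_count_fixed_pair modality_maps pair out) := by unfold Spec_count_fixed_pair; infer_instance

-- ===== CLAIM (what is proved, stated in full; the proofs are below) =====
def Claim_equal_count_fixed_pair : Prop := ∀ (modality_maps : List (String × List (String × List String))) (pair : String × String), Dom_count_fixed_pair modality_maps pair → Pre_count_fixed_pair modality_maps pair → Spec_count_fixed_pair modality_maps pair (count_fixed_pair modality_maps pair)

-- ===== LEMMAS AND PROOFS =====

theorem pv_inter_eq_filter (s t : PySem.Set String) :
    PySem.Set.inter s t = s.filter (fun x => t.contains x) := rfl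

theorem pv_foldl_inter (l : List (List String)) (acc : List String) :
    l.foldl (fun a t => PySem.Set.inter a t) acc
      = acc.filter (fun x => l.all (fun t => t.contains x)) := by
  induction l generalizing acc with
  | nil => simp
  | cons t rest ih =>
    rw [List.foldl_cons, ih, pv_inter_eq_filter]
    simp only [List.filter_filter, List.all_cons]
    exact List.filter_congr (fun x _ => by rw [Bool.and_comm]; simp [pysem])

theorem pvGet_eq_nil_of_not_mem (d : List (String × List String)) (k : String)
    (h : k ∉ d.map Prod.fst) : pvGet d k = [] := by
  induction d with
  | nil => rfl
  | cons q rest ih =>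
    simp only [List.map_cons, List.mem_cons, not_or] at h
    have hne : (q.1 == k) = false := by
      simp only [beq_eq_false_iff_ne, ne_eq]
      exact fun e => h.1 e.symm
    simp only [pvGet, hne, Bool.false_eq_true, if_false]
    exact ih h.2

-- under nodup keys, filtering items then taking keys = taking keys then filtering via lookup
theorem pv_good_eq (d : List (String × List String)) (va vb : String)
    (hnd : (d.map Prod.fst).Nodup) :
    (d.filter (fun q => q.2.contains va && q.2.contains vb)).map Prod.fst
      = (d.map Prod.fst).filter
          (fun k => (pvGet d k).contains va && (pvGet d k).contains vb) := by
  induction d with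
  | nil => rfl
  | cons q rest ih =>
    obtain ⟨k, v⟩ := q
    simp only [List.map_cons, List.nodup_cons] at hnd
    obtain ⟨h1, h2⟩ := hnd
    have hself : pvGet ((k, v) :: rest) k = v := by simp [pvGet]
    have hstep : ∀ k' ∈ rest.map Prod.fst, pvGet ((k, v) :: rest) k' = pvGet rest k' := by
      intro k' hk'
      have hne : (k == k') = false := by
        simp only [beq_eq_false_iff_ne, ne_eq]
        exact fun e => h1 (e ▸ hk')
      simp [pvGet, hne]
    have hR : List.filter (fun k' => (pvGet ((k, v) :: rest) k').contains va && (pvGet ((k, v) :: rest) k').contains vb) (List.map Prod.fst rest)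
        = List.filter (fun k' => (pvGet rest k').contains va && (pvGet rest k').contains vb) (List.map Prod.fst rest) :=
      List.filter_congr (fun x hx => by rw [hstep x hx])
    simp only [List.filter_cons, List.map_cons, hself, hR, ← ih h2]
    rw [apply_ite (List.map Prod.fst)]
    simp

theorem pv_nodup_foldl_update (l : List (String × List (String × List String)))
    (s : List String) (hs : s.Nodup) :
    (l.foldl (fun acc p => PySem.Set.update acc (PySem.List.dedup (p.2.map Prod.fst))) s).Nodup := by
  induction l generalizing s with
  | nil => exact hs
  | cons p rest ih => exact ih _ (PySem.Set.nodup_update _ _ hs)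

theorem pv_foldl_update_ext (l : List (String × List (String × List String)))
    (s : List String) :
    ∃ ext, l.foldl (fun acc p => PySem.Set.update acc (PySem.List.dedup (p.2.map Prod.fst))) s
             = s ++ ext ∧ ∀ x ∈ ext, x ∉ s := by
  induction l generalizing s with
  | nil => exact ⟨[], by simp⟩
  | cons p rest ih =>
    simp only [List.foldl_cons]
    rw [PySem.Set.update_eq_append_filter]
    set nw := List.filter (fun y => !PySem.Set.contains s y) (PySem.Set.ofList (PySem.List.dedup (List.map Prod.fst p.2))) with hnw
    obtain ⟨ext1, hE, hM⟩ := ih (s ++ nw)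
    refine ⟨nw ++ ext1, by rw [hE, List.append_assoc], ?_⟩
    intro x hx hxs
    rcases List.mem_append.mp hx with h | h
    · rw [hnw] at h
      have hns := List.of_mem_filter h
      simp only [Bool.not_eq_eq_eq_not, Bool.not_true, PySem.Set.contains_eq_listContains] at hns
      exact absurd hxs (by simpa using hns)
    · exact hM x h (List.mem_append_left _ hxs)

theorem pv_contains_good (d : List (String × List String)) (va vb x : String)
    (hnd : (d.map Prod.fst).Nodup) :
    PySem.Set.contains (goodRegions d va vb) x
      = ((pvGet d x).contains va && (pvGet d x).contains vb) := by
  have hmem : x ∈ goodRegions d va vb ↔ ((pvGet d x).contains va && (pvGet d x).contains vb) = true := by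
    rw [goodRegions, PySem.Set.mem_ofList, pv_good_eq d va vb hnd]
    constructor
    · intro hx; exact (List.mem_filter.mp hx).2
    · intro hx
      refine List.mem_filter.mpr ⟨?_, hx⟩
      by_contra hnx
      rw [pvGet_eq_nil_of_not_mem d x hnx] at hx
      simp at hx
  by_cases h : ((pvGet d x).contains va && (pvGet d x).contains vb) = true
  · rw [h]
    rw [PySem.Set.contains_iff]
    exact hmem.mpr h
  · have h2 : PySem.Set.contains (goodRegions d va vb) x = false := by
      rw [Bool.eq_false_iff]
      intro hc
      rw [PySem.Set.contains_iff] at hc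
      exact h (hmem.mp hc)
    rw [h2, (Bool.eq_false_iff.mpr h).symm]

theorem pv_all_good (rest : List (String × List (String × List String))) (va vb x : String)
    (h : ∀ p ∈ rest, (p.2.map Prod.fst).Nodup) :
    rest.all (fun p => PySem.Set.contains (goodRegions p.2 va vb) x)
      = rest.all (fun p => (pvGet p.2 x).contains va && (pvGet p.2 x).contains vb) := by
  induction rest with
  | nil => rfl
  | cons p tl ih =>
    simp only [List.all_cons, pv_contains_good p.2 va vb x (h p (List.mem_cons_self ..)),
      ih (fun q hq => h q (List.mem_cons_of_mem _ hq))]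

-- ===== VERDICT (by name: the statement is the Claim_ definition above) =====
theorem count_fixed_pair_spec : Claim_equal_count_fixed_pair := by
  intro mm pair _hdom hpre
  show count_fixed_pair mm pair = count_fixed_pair_alt mm pair
  cases mm with
  | nil => rfl
  | cons m rest =>
    obtain ⟨va, vb⟩ := pair
    have hndm : (m.2.map Prod.fst).Nodup := hpre m (List.mem_cons_self ..)
    have hK : PySem.List.dedup (m.2.map Prod.fst) = m.2.map Prod.fst := by
      rw [PySem.List.dedup_eq_ofList]
      exact PySem.Set.ofList_eq_self_of_nodup _ hndm
    have hKnodup : (PySem.List.dedup (m.2.map Prod.fst)).Nodup := hK.symm ▸ hndm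
    obtain ⟨ext, hE, hM⟩ := pv_foldl_update_ext rest (PySem.List.dedup (m.2.map Prod.fst))
    have hUnodup := pv_nodup_foldl_update rest (PySem.List.dedup (m.2.map Prod.fst)) hKnodup
    have hinit : PySem.Set.update PySem.Set.empty (PySem.List.dedup (m.2.map Prod.fst))
        = PySem.List.dedup (m.2.map Prod.fst) := by
      show PySem.Set.update [] _ = _
      rw [PySem.Set.update_nil_left]
      exact PySem.Set.ofList_eq_self_of_nodup _ hKnodup
    simp only [count_fixed_pair, count_fixed_pair_alt, List.foldl_cons, List.map_cons, hinit]
    rw [hE, PySem.List.foldl_append_if_eq_filter, pv_foldl_inter]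
    rw [List.nil_append, List.filter_append]
    have hextnil : List.filter (fun reg => (m :: rest).all fun p => (pvGet p.2 reg).contains va && (pvGet p.2 reg).contains vb) ext = [] := by
      rw [List.filter_eq_nil_iff]
      intro x hx
      have hxk : x ∉ List.map Prod.fst m.2 := by
        have h0 := hM x hx
        rw [hK] at h0
        exact h0
      simp [List.all_cons, pvGet_eq_nil_of_not_mem m.2 x hxk]
    rw [hextnil, List.append_nil]
    rw [PySem.Set.ofList_eq_self_of_nodup _ (hKnodup.filter _)]
    have hgood : goodRegions m.2 va vb = List.filter (fun k => (pvGet m.2 k).contains va && (pvGet m.2 k).contains vb) (List.map Prod.fst m.2) := by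
      rw [goodRegions, pv_good_eq m.2 va vb hndm]
      exact PySem.Set.ofList_eq_self_of_nodup _ (hndm.filter _)
    have hrest : ∀ q ∈ rest, (q.2.map Prod.fst).Nodup := fun q hq => hpre q (List.mem_cons_of_mem _ hq)
    rw [hgood]
    rw [List.filter_congr (l := List.filter (fun k => (pvGet m.2 k).contains va && (pvGet m.2 k).contains vb) (List.map Prod.fst m.2))
      (fun x _ => by
        simp only [List.all_map]
        simpa using pv_all_good rest va vb x hrest)]
    rw [hK, List.filter_filter]
    refine List.filter_congr (fun x _ => ?_)
    simp only [List.all_cons]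
    rw [Bool.and_comm]
    simp
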